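-- pv_equiv track=rewrite | github.com/mgtezak/Advent_of_Code | 2023/14/p1.py | part1
-- ===== SOURCE A (Python) =====
-- def part1(puzzle_input):
--     grid = [list(row) for row in puzzle_input.split('\n')]
--     m, n = len(grid), len(grid[0])
--     for c in range(n):
--         lim = 0
--         for r in range(m):
--             if grid[r][c] == '#':
--                 lim = r + 1
--             elif grid[r][c] == 'O':
--                 if r > lim:
--                     grid[lim][c] = 'O'
--                     grid[r][c] = '.'
--                 lim += 1
--
--     total_load = 0
--     for r in range(m):
--         for c in range(n):
--             if grid[r][c] == 'O':
--                 total_load += m - r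
--
--     return total_load
-- ===== SOURCE B (Python) =====
-- def part1(puzzle_input):
--     rows = puzzle_input.split('\n')
--     m = len(rows)
--     total = 0
--     for c in range(len(rows[0])):
--         lim = 0
--         for r in range(m):
--             ch = rows[r][c]
--             if ch == '#':
--                 lim = r + 1
--             elif ch == 'O':
--                 total += m - lim
--                 lim += 1
--     return total
-- ===== Notes on version B (the rewrite author's own statement) =====
-- stated objective: simpler
-- what changed: B drops A's grid mutation and its second summing double-loop: a single read-only pass per column tracks the lowest free row and adds each rock's resting load (m - lim) directly to the total.
import Mathlib
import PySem

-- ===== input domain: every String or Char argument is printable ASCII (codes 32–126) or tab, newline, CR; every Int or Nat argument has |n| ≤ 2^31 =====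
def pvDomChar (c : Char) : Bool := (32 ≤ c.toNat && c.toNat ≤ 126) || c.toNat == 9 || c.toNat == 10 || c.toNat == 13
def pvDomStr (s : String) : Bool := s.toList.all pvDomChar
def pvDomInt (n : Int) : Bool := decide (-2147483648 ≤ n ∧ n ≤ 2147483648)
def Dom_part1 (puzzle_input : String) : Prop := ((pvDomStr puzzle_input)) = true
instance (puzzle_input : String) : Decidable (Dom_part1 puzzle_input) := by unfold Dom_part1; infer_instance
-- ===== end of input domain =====

-- B removes A's whole grid-mutation pass and A's second summing double-loop: one read-only
-- pass per column accumulates each rock's resting load directly (objective: simpler).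

-- ===== PORT A =====
-- grid[r][c] read / written with defaults; always in range under Pre_part1 (otherwise Python raises IndexError)
def gridGet (g : List (List Char)) (r c : Nat) : Char := (g.getD r []).getD c ' '
def gridSet (g : List (List Char)) (r c : Nat) (ch : Char) : List (List Char) :=
  g.set r ((g.getD r []).set c ch)

-- A's inner 'for r in range(m)' of the first pass, for one column c (state: grid, lim)
def settleCol (m c : Nat) (g : List (List Char)) : List (List Char) :=
  ((List.range m).foldl (fun (st : List (List Char) × Nat) r =>
      if gridGet st.1 r c = '#' then (st.1, r + 1)
      else if gridGet st.1 r c = 'O' then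
        ((if st.2 < r then gridSet (gridSet st.1 st.2 c 'O') r c '.' else st.1), st.2 + 1)
      else st) (g, 0)).1

def part1 (puzzle_input : String) : Int :=
  -- grid = [list(row) for row in puzzle_input.split('\n')] (split('\n') is PySem.Chars.splitOn, total since the separator is nonempty)
  let grid : List (List Char) := PySem.Chars.splitOn puzzle_input.toList ['\n']
  let m := grid.length
  let n := (grid.headD []).length      -- len(grid[0]); split('\n') never returns an empty list
  let grid2 := (List.range n).foldl (fun g c => settleCol m c g) grid
  (List.range m).foldl (fun tot r =>
    (List.range n).foldl (fun (tot : Int) c =>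
      if gridGet grid2 r c = 'O' then tot + ((m : Int) - (r : Int)) else tot) tot) 0

-- ===== PORT B =====
def part1_alt (puzzle_input : String) : Int :=
  let rows : List (List Char) := PySem.Chars.splitOn puzzle_input.toList ['\n']
  let m := rows.length
  (List.range ((rows.headD []).length)).foldl (fun (total : Int) c =>
    ((List.range m).foldl (fun (st : Int × Nat) r =>
        let ch := (rows.getD r []).getD c ' '    -- rows[r][c]; in range under Pre_part1
        if ch = '#' then (st.1, r + 1)
        else if ch = 'O' then (st.1 + ((m : Int) - (st.2 : Int)), st.2 + 1)
        else st) (total, 0)).1) 0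

-- ===== PRECONDITION & SPEC =====
-- Pre_ excludes exactly the ragged inputs on which Python A raises IndexError: some row of the
-- grid shorter than row 0 (A indexes every row at all columns of row 0); B raises there too.
def Pre_part1 (puzzle_input : String) : Prop :=
  ∀ row ∈ PySem.Chars.splitOn puzzle_input.toList ['\n'],
    ((PySem.Chars.splitOn puzzle_input.toList ['\n']).headD []).length ≤ row.length
instance (puzzle_input : String) : Decidable (Pre_part1 puzzle_input) := by unfold Pre_part1; infer_instance

def pvWitness_part1 : String := "O#.\n..O\nO.."

def Spec_part1 (puzzle_input : String) (out : Int) : Prop := out = part1_alt puzzle_input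
instance (puzzle_input : String) (out : Int) : Decidable (Spec_part1 puzzle_input out) := by unfold Spec_part1; infer_instance

-- ===== CLAIM (what is proved, stated in full; the proofs are below) =====
def Claim_equal_part1 : Prop := ∀ (puzzle_input : String), Dom_part1 puzzle_input → Pre_part1 puzzle_input → Spec_part1 puzzle_input (part1 puzzle_input)

-- ===== LEMMAS AND PROOFS =====

-- column c of a grid, read the way both ports read characters (default ' ' is never hit in range)
def colOf (g : List (List Char)) (c : Nat) : List Char := g.map (fun row => row.getD c ' ')

-- one step of A's settling, on the column alone
def vStep (r : Nat) (st : List Char × Nat) : List Char × Nat :=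
  if st.1.getD r ' ' = '#' then (st.1, r + 1)
  else if st.1.getD r ' ' = 'O' then
    ((if st.2 < r then (st.1.set st.2 'O').set r '.' else st.1), st.2 + 1)
  else st

def vSettle (m : Nat) (v : List Char) : List Char :=
  ((List.range m).foldl (fun st r => vStep r st) (v, 0)).1

-- weighted load of the first s entries of a column, weights m - r
def loadPrefix (m s : Nat) (w : List Char) : Int :=
  ∑ r ∈ Finset.range s, (if w.getD r ' ' = 'O' then ((m : Int) - (r : Int)) else 0)

lemma getD_set_self {α : Type} (w : List α) (j : Nat) (x d : α) (h : j < w.length) :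
    (w.set j x).getD j d = x := by
  simp [List.getD_eq_getElem?_getD, h]


lemma getD_set_ne {α : Type} (w : List α) (i j : Nat) (x d : α) (h : i ≠ j) :
    (w.set j x).getD i d = w.getD i d := by
  simp [List.getD_eq_getElem?_getD, Ne.symm h]

lemma colOf_getD (g : List (List Char)) (c r : Nat) :
    (colOf g c).getD r ' ' = (g.getD r []).getD c ' ' := by
  simp only [colOf, List.getD_eq_getElem?_getD, List.getElem?_map]
  cases g[r]? <;> simp

lemma length_colOf (g : List (List Char)) (c : Nat) : (colOf g c).length = g.length := by
  simp [colOf]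

lemma length_gridSet (g : List (List Char)) (r c : Nat) (ch : Char) :
    (gridSet g r c ch).length = g.length := by simp [gridSet]

lemma rowlen_gridSet (g : List (List Char)) (r c : Nat) (ch : Char) (i : Nat) :
    ((gridSet g r c ch).getD i []).length = (g.getD i []).length := by
  unfold gridSet
  rcases eq_or_ne i r with h | h
  · subst h
    by_cases hr : i < g.length
    · rw [getD_set_self _ _ _ _ hr]
      simp [List.getD_eq_getElem?_getD, hr]
    · rw [List.set_eq_of_length_le (by omega)]
  · rw [getD_set_ne _ _ _ _ _ h]

lemma colOf_gridSet_self (g : List (List Char)) (r c : Nat) (ch : Char)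
    (_hr : r < g.length) (hc : c < (g.getD r []).length) :
    colOf (gridSet g r c ch) c = (colOf g c).set r ch := by
  unfold colOf gridSet
  rw [List.map_set]
  congr 1
  exact getD_set_self _ _ _ _ hc

lemma colOf_gridSet_ne (g : List (List Char)) (r c c' : Nat) (ch : Char) (h : c' ≠ c) :
    colOf (gridSet g r c ch) c' = colOf g c' := by
  unfold colOf gridSet
  rw [List.map_set]
  apply List.ext_getElem?
  intro i
  rw [List.getElem?_set]
  rcases eq_or_ne r i with hri | hri
  · subst hri
    by_cases hr : r < g.length
    · simp [hr, List.getD_eq_getElem?_getD, Ne.symm h]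
    · simp [List.length_map, hr]
  · simp [hri]

-- generic fold simulation
lemma foldl_sim {α β γ : Type} (R : α → β → Prop) (f : α → γ → α) (h : β → γ → β)
    (l : List γ) (hs : ∀ x ∈ l, ∀ a b, R a b → R (f a x) (h b x)) :
    ∀ a b, R a b → R (l.foldl f a) (l.foldl h b) := by
  induction l with
  | nil => intro a b hab; exact hab
  | cons x t ih =>
      intro a b hab
      exact ih (fun y hy a b hab => hs y (List.mem_cons_of_mem _ hy) a b hab)
        _ _ (hs x (List.mem_cons_self ..) a b hab)

-- A's first pass on column c only changes column c, and changes it to vSettle of the column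
lemma settleCol_spec (c : Nat) (g : List (List Char))
    (H : ∀ i, i < g.length → c < (g.getD i []).length) :
    colOf (settleCol g.length c g) c = vSettle g.length (colOf g c) ∧
    (∀ c', c' ≠ c → colOf (settleCol g.length c g) c' = colOf g c') ∧
    (settleCol g.length c g).length = g.length ∧
    (∀ i, ((settleCol g.length c g).getD i []).length = (g.getD i []).length) := by
  have main := foldl_sim
    (R := fun (gst : List (List Char) × Nat) (vst : List Char × Nat) =>
      gst.2 = vst.2 ∧ colOf gst.1 c = vst.1 ∧
      (∀ c', c' ≠ c → colOf gst.1 c' = colOf g c') ∧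
      gst.1.length = g.length ∧
      (∀ i, ((gst.1.getD i []).length = (g.getD i []).length)))
    (f := fun (st : List (List Char) × Nat) r =>
      if gridGet st.1 r c = '#' then (st.1, r + 1)
      else if gridGet st.1 r c = 'O' then
        ((if st.2 < r then gridSet (gridSet st.1 st.2 c 'O') r c '.' else st.1), st.2 + 1)
      else st)
    (h := fun st r => vStep r st)
    (List.range g.length) ?_ (g, 0) (colOf g c, 0) ⟨rfl, rfl, fun _ _ => rfl, rfl, fun _ => rfl⟩
  · obtain ⟨_, h1, h2, h3, h4⟩ := main
    exact ⟨h1, h2, h3, h4⟩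
  · rintro r hr ⟨g', lim⟩ ⟨v', lim'⟩ ⟨hlim, hcol, hoth, hlen, hrow⟩
    have hrm : r < g.length := List.mem_range.mp hr
    dsimp only at hlim hcol hoth hlen hrow ⊢
    subst hlim
    have hch : gridGet g' r c = v'.getD r ' ' := by
      rw [← hcol, colOf_getD]; rfl
    unfold vStep
    rw [hch]
    split
    · exact ⟨rfl, hcol, hoth, hlen, hrow⟩
    · split
      · refine ⟨rfl, ?_, ?_, ?_, ?_⟩
        · dsimp only
          split
          · rename_i hlr
            have hrl : r < g'.length := by omega
            have hll : lim < g'.length := by omega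
            have hcr : c < (g'.getD r []).length := by rw [hrow r]; exact H r hrm
            have hcl : c < (g'.getD lim []).length := by rw [hrow lim]; exact H lim (by omega)
            rw [colOf_gridSet_self _ _ _ _ (by rw [length_gridSet]; exact hrl)
                  (by rw [rowlen_gridSet]; exact hcr),
                colOf_gridSet_self _ _ _ _ hll hcl, hcol]
          · exact hcol
        · intro c' hc'
          dsimp only
          split
          · rw [colOf_gridSet_ne _ _ _ _ _ hc', colOf_gridSet_ne _ _ _ _ _ hc', hoth c' hc']
          · exact hoth c' hc'
        · dsimp only; split <;> simp [length_gridSet, hlen]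
        · intro i
          dsimp only
          split
          · rw [rowlen_gridSet, rowlen_gridSet, hrow]
          · exact hrow i
      · exact ⟨rfl, hcol, hoth, hlen, hrow⟩

-- the whole first pass, column by column
lemma pass1_inv (g0 : List (List Char)) (n : Nat)
    (Hn : ∀ i, i < g0.length → n ≤ (g0.getD i []).length) :
    ∀ k, k ≤ n →
      (((List.range k).foldl (fun g c => settleCol g0.length c g) g0).length = g0.length ∧
       (∀ i, (((List.range k).foldl (fun g c => settleCol g0.length c g) g0).getD i []).length
           = (g0.getD i []).length) ∧
       (∀ c, c < k → colOf ((List.range k).foldl (fun g c => settleCol g0.length c g) g0) c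
           = vSettle g0.length (colOf g0 c)) ∧
       (∀ c, k ≤ c → colOf ((List.range k).foldl (fun g c => settleCol g0.length c g) g0) c
           = colOf g0 c)) := by
  intro k
  induction k with
  | zero => intro _; exact ⟨rfl, fun _ => rfl, fun c hc => absurd hc (by omega), fun _ _ => rfl⟩
  | succ k ih =>
      intro hk
      obtain ⟨hlen, hrow, hdone, hrest⟩ := ih (by omega)
      rw [List.range_succ, List.foldl_append, List.foldl_cons, List.foldl_nil]
      set G := (List.range k).foldl (fun g c => settleCol g0.length c g) g0 with hG
      have hGlen : G.length = g0.length := hlen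
      have Hc : ∀ i, i < G.length → k < (G.getD i []).length := by
        intro i hi
        rw [hrow i]
        have := Hn i (by omega)
        omega
      have spec := settleCol_spec k G Hc
      rw [hGlen] at spec
      obtain ⟨s1, s2, s3, s4⟩ := spec
      refine ⟨by rw [s3], fun i => by rw [s4 i, hrow i], ?_, ?_⟩
      · intro c hc
        rcases eq_or_ne c k with h | h
        · subst h; rw [s1, hrest c (le_refl _)]
        · rw [s2 c h, hdone c (by omega)]
      · intro c hc
        rw [s2 c (by omega), hrest c (by omega)]

-- fold-with-conditional-add is a sum
lemma sum_range_list (n : Nat) (f : Nat → Int) :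
    ((List.range n).map f).sum = ∑ i ∈ Finset.range n, f i := rfl

lemma foldl_load (n : Nat) (f : Nat → Prop) [DecidablePred f] (w : Nat → Int) (t : Int) :
    (List.range n).foldl (fun (tot : Int) c => if f c then tot + w c else tot) t
      = t + ∑ c ∈ Finset.range n, (if f c then w c else 0) := by
  have h1 : (List.range n).foldl (fun (tot : Int) c => if f c then tot + w c else tot) t
      = (List.range n).foldl (fun (tot : Int) c => tot + (if f c then w c else 0)) t := by
    apply PySem.List.foldl_congr_mem
    intro acc x _
    split <;> simp
  rw [h1, PySem.List.foldl_add, sum_range_list]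

lemma loadPrefix_succ (m s : Nat) (w : List Char) :
    loadPrefix m (s + 1) w
      = loadPrefix m s w + (if w.getD s ' ' = 'O' then ((m : Int) - (s : Int)) else 0) := by
  unfold loadPrefix; rw [Finset.sum_range_succ]

lemma loadPrefix_set_high (m s j : Nat) (w : List Char) (x : Char) (h : s ≤ j) :
    loadPrefix m s (w.set j x) = loadPrefix m s w := by
  unfold loadPrefix
  apply Finset.sum_congr rfl
  intro r hr
  rw [getD_set_ne _ _ _ _ _ (by have := Finset.mem_range.mp hr; omega)]

lemma loadPrefix_set (m s j : Nat) (w : List Char) (x : Char) (hjs : j < s) (hjw : j < w.length) :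
    loadPrefix m s (w.set j x)
      = loadPrefix m s w
        - (if w.getD j ' ' = 'O' then ((m : Int) - (j : Int)) else 0)
        + (if x = 'O' then ((m : Int) - (j : Int)) else 0) := by
  unfold loadPrefix
  have hj : j ∈ Finset.range s := Finset.mem_range.mpr hjs
  rw [← Finset.add_sum_erase _ _ hj, ← Finset.add_sum_erase _ (fun r => (if w.getD r ' ' = 'O' then ((m : Int) - (r : Int)) else 0)) hj]
  have he : ∑ r ∈ (Finset.range s).erase j, (if (w.set j x).getD r ' ' = 'O' then ((m : Int) - (r : Int)) else 0)
      = ∑ r ∈ (Finset.range s).erase j, (if w.getD r ' ' = 'O' then ((m : Int) - (r : Int)) else 0) := by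
    apply Finset.sum_congr rfl
    intro r hr
    rw [getD_set_ne _ _ _ _ _ (Finset.ne_of_mem_erase hr)]
  rw [he, getD_set_self _ _ _ _ hjw]
  ring

-- the heart: A's per-column settle-then-weigh equals B's running total
lemma main_inv (m : Nat) (v : List Char) (hv : v.length = m) :
    ∀ (k s : Nat) (v' : List Char) (lim : Nat) (tot : Int),
      s + k = m → v'.length = m → lim ≤ s →
      (∀ i, s ≤ i → v'.getD i ' ' = v.getD i ' ') →
      (∀ i, lim ≤ i → i < s → v'.getD i ' ' ≠ 'O') →
      loadPrefix m s v' = tot →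
      loadPrefix m m (((List.range' s k).foldl (fun st r => vStep r st) (v', lim)).1)
        = ((List.range' s k).foldl (fun (st : Int × Nat) r =>
            if v.getD r ' ' = '#' then (st.1, r + 1)
            else if v.getD r ' ' = 'O' then (st.1 + ((m : Int) - (st.2 : Int)), st.2 + 1)
            else st) (tot, lim)).1 := by
  intro k
  induction k with
  | zero =>
      intro s v' lim tot hsk hlen hls hsuf hno hload
      have : s = m := by omega
      subst this
      simpa using hload
  | succ k ih =>
      intro s v' lim tot hsk hlen hls hsuf hno hload
      rw [List.range'_succ, List.foldl_cons, List.foldl_cons]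
      have hsm : s < m := by omega
      have hch : v'.getD s ' ' = v.getD s ' ' := hsuf s (le_refl _)
      unfold vStep
      rw [hch]
      by_cases h1 : v.getD s ' ' = '#'
      · rw [if_pos h1, if_pos h1]
        apply ih (s + 1) v' (s + 1) tot (by omega) hlen (le_refl _)
          (fun i hi => hsuf i (by omega)) (fun i hi hi2 => absurd hi2 (by omega))
        rw [loadPrefix_succ, hch, h1]
        simpa using hload
      · rw [if_neg h1, if_neg h1]
        by_cases h2 : v.getD s ' ' = 'O'
        · rw [if_pos h2, if_pos h2]
          dsimp only
          by_cases h3 : lim < s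
          · rw [if_pos h3]
            set v'' := (v'.set lim 'O').set s '.' with hv''
            have hlimlen : lim < v'.length := by omega
            have hslen : s < (v'.set lim 'O').length := by simp [hlen]; omega
            apply ih (s + 1) v'' (lim + 1) (tot + ((m : Int) - (lim : Int))) (by omega)
              (by simp [hv'', hlen]) (by omega)
            · intro i hi
              rw [hv'', getD_set_ne _ _ _ _ _ (by omega), getD_set_ne _ _ _ _ _ (by omega)]
              exact hsuf i (by omega)
            · intro i hi hi2
              rcases eq_or_ne i s with h | h
              · subst h
                rw [hv'', getD_set_self _ _ _ _ hslen]
                decide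
              · rw [hv'', getD_set_ne _ _ _ _ _ h, getD_set_ne _ _ _ _ _ (by omega)]
                exact hno i (by omega) (by omega)
            · rw [loadPrefix_succ]
              have hdot : v''.getD s ' ' = '.' := getD_set_self _ _ _ _ hslen
              rw [hdot]
              have hv''s : loadPrefix m s v'' = loadPrefix m s (v'.set lim 'O') :=
                loadPrefix_set_high _ _ _ _ _ (le_refl _)
              rw [hv''s, loadPrefix_set _ _ _ _ _ h3 hlimlen,
                  if_neg (hno lim (le_refl _) h3), if_pos rfl, hload]
              simp
          · rw [if_neg h3]
            have hlim : lim = s := by omega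
            apply ih (s + 1) v' (lim + 1) (tot + ((m : Int) - (lim : Int))) (by omega) hlen (by omega)
              (fun i hi => hsuf i (by omega))
              (fun i hi hi2 => absurd (by omega : i = s ∧ lim ≤ i) (by omega))
            rw [loadPrefix_succ, hch, if_pos h2, hload, hlim]
        · rw [if_neg h2, if_neg h2]
          apply ih (s + 1) v' lim tot (by omega) hlen (by omega)
            (fun i hi => hsuf i (by omega))
          · intro i hi hi2
            rcases eq_or_ne i s with h | h
            · subst h; rw [hch]; exact h2
            · exact hno i hi (by omega)
          · rw [loadPrefix_succ, hch, if_neg h2, hload]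
            ring
  
-- B's inner loop is translation-invariant in its total
lemma foldB_shift (m : Nat) (v : List Char) (l : List Nat) :
    ∀ (lim : Nat) (t : Int),
      (l.foldl (fun (st : Int × Nat) r =>
          if v.getD r ' ' = '#' then (st.1, r + 1)
          else if v.getD r ' ' = 'O' then (st.1 + ((m : Int) - (st.2 : Int)), st.2 + 1)
          else st) (t, lim)).1
        = t + (l.foldl (fun (st : Int × Nat) r =>
          if v.getD r ' ' = '#' then (st.1, r + 1)
          else if v.getD r ' ' = 'O' then (st.1 + ((m : Int) - (st.2 : Int)), st.2 + 1)
          else st) (0, lim)).1 := by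
  induction l with
  | nil => intro lim t; simp
  | cons r tl ih =>
      intro lim t
      rw [List.foldl_cons, List.foldl_cons]
      dsimp only
      split
      · exact ih (r + 1) t
      · split
        · rw [ih (lim + 1) (t + ((m : Int) - (lim : Int))), ih (lim + 1) (0 + ((m : Int) - (lim : Int)))]
          ring
        · exact ih lim t

-- the per-column result, packaged
lemma col_result (m : Nat) (v : List Char) (hv : v.length = m) (t : Int) :
    ((List.range m).foldl (fun (st : Int × Nat) r =>
        if v.getD r ' ' = '#' then (st.1, r + 1)
        else if v.getD r ' ' = 'O' then (st.1 + ((m : Int) - (st.2 : Int)), st.2 + 1)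
        else st) (t, 0)).1
      = t + loadPrefix m m (vSettle m v) := by
  rw [foldB_shift]
  congr 1
  rw [vSettle, List.range_eq_range']
  exact (main_inv m v hv m 0 v 0 0 (by omega) hv (le_refl _)
    (fun i _ => rfl) (fun i h1 h2 => absurd h2 (by omega)) (by simp [loadPrefix])).symm

theorem part1_spec : Claim_equal_part1 := by
  intro s _ hpre
  unfold Spec_part1 part1 part1_alt
  set g0 : List (List Char) := PySem.Chars.splitOn s.toList ['\n'] with hg0
  set m := g0.length with hm
  set n := (g0.headD []).length with hn
  dsimp only
  have Hn : ∀ i, i < g0.length → n ≤ (g0.getD i []).length := by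
    intro i hi
    have hmem : g0.getD i [] ∈ g0 := by
      rw [List.getD_eq_getElem?_getD, List.getElem?_eq_getElem hi]
      exact List.getElem_mem hi
    exact hpre _ hmem
  obtain ⟨hlen, hrow, hdone, _⟩ := pass1_inv g0 n Hn n (le_refl _)
  set G := (List.range n).foldl (fun g c => settleCol m c g) g0 with hG
  -- A's second pass as a double sum
  have hA : (List.range m).foldl (fun tot r =>
      (List.range n).foldl (fun (tot : Int) c =>
        if gridGet G r c = 'O' then tot + ((m : Int) - (r : Int)) else tot) tot) 0
      = ∑ r ∈ Finset.range m, ∑ c ∈ Finset.range n,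
          (if gridGet G r c = 'O' then ((m : Int) - (r : Int)) else 0) := by
    have hin : ∀ (t : Int) r, (List.range n).foldl (fun (tot : Int) c =>
        if gridGet G r c = 'O' then tot + ((m : Int) - (r : Int)) else tot) t
        = t + ∑ c ∈ Finset.range n, (if gridGet G r c = 'O' then ((m : Int) - (r : Int)) else 0) := by
      intro t r
      exact foldl_load n (fun c => gridGet G r c = 'O') (fun _ => ((m : Int) - (r : Int))) t
    have : (List.range m).foldl (fun tot r =>
        (List.range n).foldl (fun (tot : Int) c =>
          if gridGet G r c = 'O' then tot + ((m : Int) - (r : Int)) else tot) tot) 0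
        = (List.range m).foldl (fun (tot : Int) r =>
            tot + ∑ c ∈ Finset.range n, (if gridGet G r c = 'O' then ((m : Int) - (r : Int)) else 0)) 0 := by
      apply PySem.List.foldl_congr_mem
      intro acc x _
      exact hin acc x
    rw [this, PySem.List.foldl_add, sum_range_list]
    simp only [zero_add]
  rw [hA, Finset.sum_comm]
  -- each column's contribution is the settled column's load
  have hAcol : ∀ c, c < n → ∑ r ∈ Finset.range m, (if gridGet G r c = 'O' then ((m : Int) - (r : Int)) else 0)
      = loadPrefix m m (vSettle m (colOf g0 c)) := by
    intro c hc
    rw [← hdone c hc]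
    unfold loadPrefix
    apply Finset.sum_congr rfl
    intro r _
    rw [colOf_getD]
    rfl
  -- B's outer loop as the same sum
  have hB : (List.range n).foldl (fun (total : Int) c =>
      ((List.range m).foldl (fun (st : Int × Nat) r =>
          let ch := (g0.getD r []).getD c ' '
          if ch = '#' then (st.1, r + 1)
          else if ch = 'O' then (st.1 + ((m : Int) - (st.2 : Int)), st.2 + 1)
          else st) (total, 0)).1) 0
      = ∑ c ∈ Finset.range n, loadPrefix m m (vSettle m (colOf g0 c)) := by
    have hstep : ∀ (t : Int) c, ((List.range m).foldl (fun (st : Int × Nat) r =>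
          let ch := (g0.getD r []).getD c ' '
          if ch = '#' then (st.1, r + 1)
          else if ch = 'O' then (st.1 + ((m : Int) - (st.2 : Int)), st.2 + 1)
          else st) (t, 0)).1
        = t + loadPrefix m m (vSettle m (colOf g0 c)) := by
      intro t c
      have heq : (List.range m).foldl (fun (st : Int × Nat) r =>
          let ch := (g0.getD r []).getD c ' '
          if ch = '#' then (st.1, r + 1)
          else if ch = 'O' then (st.1 + ((m : Int) - (st.2 : Int)), st.2 + 1)
          else st) (t, 0)
        = (List.range m).foldl (fun (st : Int × Nat) r =>
          if (colOf g0 c).getD r ' ' = '#' then (st.1, r + 1)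
          else if (colOf g0 c).getD r ' ' = 'O' then (st.1 + ((m : Int) - (st.2 : Int)), st.2 + 1)
          else st) (t, 0) := by
        apply PySem.List.foldl_congr_mem
        intro acc x _
        rw [colOf_getD]
      rw [heq, col_result m (colOf g0 c) (length_colOf g0 c) t]
    have : (List.range n).foldl (fun (total : Int) c =>
        ((List.range m).foldl (fun (st : Int × Nat) r =>
            let ch := (g0.getD r []).getD c ' '
            if ch = '#' then (st.1, r + 1)
            else if ch = 'O' then (st.1 + ((m : Int) - (st.2 : Int)), st.2 + 1)
            else st) (total, 0)).1) 0
        = (List.range n).foldl (fun (total : Int) c =>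
            total + loadPrefix m m (vSettle m (colOf g0 c))) 0 := by
      apply PySem.List.foldl_congr_mem
      intro acc x _
      exact hstep acc x
    rw [this, PySem.List.foldl_add, sum_range_list]
    simp only [zero_add]
  rw [hB]
  apply Finset.sum_congr rfl
  intro c hc
  exact hAcol c (Finset.mem_range.mp hc)
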